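-- pv_equiv track=rewrite | github.com/cutehammond772/problem-solving-archive | 백준/Platinum/1257. 엄청난 부자/엄청난 부자.py | solve
-- ===== SOURCE A (Python) =====
-- from collections import deque
--
-- INF = 2 ** 63 - 1
--
-- def solve(M, N, A):
-- 	# 유니크 처리 후 정렬한다.
-- 	A = [*sorted(set(A))]
--
-- 	K, R = A[-1], M % A[-1]
-- 	memo = [INF] * K
--
-- 	queue = deque([(0, 0)])
-- 	memo[0] = 0
--
-- 	# 0-1 BFS
-- 	while queue:
-- 		num, dist = queue.popleft()
--
-- 		if num == R:
-- 			return dist + M // K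
--
-- 		for x in range(len(A) - 1):
-- 			next_num = num + A[x]
--
-- 			if next_num < K:
-- 				if memo[next_num] <= dist + 1:
-- 					continue
--
-- 				memo[next_num] = dist + 1
-- 				queue.append((next_num, dist + 1))
--
-- 			# K를 넘어선 경우, "K를 지우고 (-1)" -> "A[x]를 추가 (+1)"한다고 생각한다.
-- 			# K를 아무리 지워도 숫자가 10^9 이상이므로 널널하기 때문이다.
-- 			else:
-- 				next_num %= K
--
-- 				if memo[next_num] <= dist:
-- 					continue
--
-- 				memo[next_num] = dist
-- 				queue.appendleft((next_num, dist))
--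
-- 	return M
-- ===== SOURCE B (Python) =====
-- INF = 2 ** 63 - 1
--
-- def solve(M, N, A):
--     # Same preprocessing as the task demands: distinct coins, largest is K.
--     A = sorted(set(A))
--     K = A[-1]
--     R = M % K
--     C = A[:-1]
--     dist = [INF] * K
--     dist[0] = 0
--     # Bellman-Ford over residues: repeat full relaxation rounds until a
--     # fixpoint (at most K rounds are ever needed).
--     for _ in range(K):
--         changed = False
--         for u in range(K):
--             du = dist[u]
--             if du == INF:
--                 continue
--             for c in C:
--                 t = u + c
--                 if t < K:
--                     if du + 1 < dist[t]:
--                         dist[t] = du + 1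
--                         changed = True
--                 else:
--                     t -= K
--                     if du < dist[t]:
--                         dist[t] = du
--                         changed = True
--         if not changed:
--             break
--     return dist[R] + M // K if dist[R] < INF else M
-- ===== Notes on version B (the rewrite author's own statement) =====
-- stated objective: alternative
-- what changed: Replaces A's 0-1 BFS (deque with appendleft/append and early return at the first pop of the target residue) by queueless Bellman-Ford: repeated full relaxation rounds over the residue array until a fixpoint (at most K rounds), then reading dist[R] off the final array.
-- outside the precondition, e.g. on solve(5, 2, [3, -1]): A returns 5, B returns 2
import Mathlib
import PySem

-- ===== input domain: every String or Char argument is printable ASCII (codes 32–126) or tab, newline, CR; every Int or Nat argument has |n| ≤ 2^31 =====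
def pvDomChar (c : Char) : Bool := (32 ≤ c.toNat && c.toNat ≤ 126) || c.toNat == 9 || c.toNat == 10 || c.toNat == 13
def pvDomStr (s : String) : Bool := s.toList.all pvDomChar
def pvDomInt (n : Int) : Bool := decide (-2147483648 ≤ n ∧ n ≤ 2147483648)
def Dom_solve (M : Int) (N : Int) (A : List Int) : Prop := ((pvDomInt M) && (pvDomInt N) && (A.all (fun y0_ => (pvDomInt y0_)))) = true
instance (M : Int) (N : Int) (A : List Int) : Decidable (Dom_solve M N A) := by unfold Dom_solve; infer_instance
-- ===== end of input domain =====

-- B replaces A's 0-1-BFS deque by queueless Bellman–Ford relaxation rounds over the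
-- residue array (stopping at a fixpoint); equal return value, not claimed faster.

-- ===== PORT A =====
def pvINF : Int := 9223372036854775807

-- body of A's inner for-loop: relax coin c from the popped pair (num, dist);
-- state is (memo, deque), deque head = left end
def pvRelaxA (K num dist : Int) (s : Array Int × List (Int × Int)) (c : Int) : Array Int × List (Int × Int) :=
  let nxt := num + c
  if nxt < K then
    if s.1.getD nxt.toNat 0 ≤ dist + 1 then s
    else (s.1.setIfInBounds nxt.toNat (dist + 1), s.2 ++ [(nxt, dist + 1)])
  else
    let nxt2 := PySem.Int.mod nxt K
    if s.1.getD nxt2.toNat 0 ≤ dist then s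
    else (s.1.setIfInBounds nxt2.toNat dist, (nxt2, dist) :: s.2)

-- A's while-loop; the fuel argument only makes the recursion total (it is proved
-- never to run out below), exhaustion falls back to the loop's own `return M`
def pvLoopA (M K R : Int) (C : List Int) : Nat → List (Int × Int) → Array Int → Int
  | 0, _, _ => M
  | fuel + 1, q, memo =>
    match q with
    | [] => M
    | (num, dist) :: rest =>
      if num = R then dist + PySem.Int.floordiv M K
      else
        let st := C.foldl (pvRelaxA K num dist) (memo, rest)
        pvLoopA M K R C fuel st.2 st.1

def solve (M : Int) (N : Int) (A : List Int) : Int :=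
  let s := PySem.List.sorted (PySem.Set.ofList A) (fun x => x) false
  match PySem.List.pyGet? s (-1) with
  | none => 0  -- A == [] : IndexError (outside Pre_)
  | some K =>
    if K ≤ 0 then 0  -- K = 0: ZeroDivisionError; K < 0: memo[0] = 0 is an IndexError (outside Pre_)
    else
      let R := PySem.Int.mod M K
      let memo := (Array.replicate K.toNat pvINF).setIfInBounds 0 0
      pvLoopA M K R s.dropLast (2 + K.toNat * 9223372036854775807) [(0, 0)] memo

-- ===== PORT B =====
-- body of B's innermost for-loop (relax coin c from u whose snapshot distance is du)
def pvInnerB (K du u : Int) (s : Array Int × Bool) (c : Int) : Array Int × Bool :=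
  let t := u + c
  if t < K then
    if du + 1 < s.1.getD t.toNat 0 then (s.1.setIfInBounds t.toNat (du + 1), true) else s
  else
    let t2 := t - K
    if du < s.1.getD t2.toNat 0 then (s.1.setIfInBounds t2.toNat du, true) else s

-- one residue u of a relaxation round
def pvRoundB (K : Int) (C : List Int) (s : Array Int × Bool) (u : Int) : Array Int × Bool :=
  let du := s.1.getD u.toNat 0
  if du = pvINF then s else C.foldl (pvInnerB K du u) s

-- up to n relaxation rounds, stopping as soon as a round changes nothing
def pvRoundsB (K : Int) (C : List Int) : Nat → Array Int → Array Int
  | 0, dist => dist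
  | n + 1, dist =>
    let st := (PySem.List.pyRange 0 K 1).foldl (pvRoundB K C) (dist, false)
    if st.2 then pvRoundsB K C n st.1 else st.1

def solve_alt (M : Int) (N : Int) (A : List Int) : Int :=
  let s := PySem.List.sorted (PySem.Set.ofList A) (fun x => x) false
  match PySem.List.pyGet? s (-1) with
  | none => 0  -- A == [] : IndexError (outside Pre_)
  | some K =>
    if K ≤ 0 then 0  -- K = 0: ZeroDivisionError; K < 0: dist[0] = 0 is an IndexError (outside Pre_)
    else
      let R := PySem.Int.mod M K
      let C := PySem.List.slice s none (some (-1))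
      let dist := (Array.replicate K.toNat pvINF).setIfInBounds 0 0
      let d := pvRoundsB K C K.toNat dist
      if d.getD R.toNat 0 < pvINF then d.getD R.toNat 0 + PySem.Int.floordiv M K else M

-- ===== PRECONDITION & SPEC =====
-- Pre_ restricts to the task's natural domain: a nonempty purse of nonnegative coin
-- values, at least one positive.  On an empty list A raises IndexError and on a
-- largest value ≤ 0 it raises ZeroDivisionError/IndexError; with negative coin
-- values present, A's negative list indices silently wrap around, an accident of
-- its implementation.
def Pre_solve (M : Int) (N : Int) (A : List Int) : Prop :=
  A ≠ [] ∧ (∀ a ∈ A, 0 ≤ a) ∧ ∃ a ∈ A, 1 ≤ a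
instance (M : Int) (N : Int) (A : List Int) : Decidable (Pre_solve M N A) := by unfold Pre_solve; infer_instance

def pvWitness_solve : Int × Int × List Int := (10, 2, [1, 3])

def Spec_solve (M : Int) (N : Int) (A : List Int) (out : Int) : Prop := out = solve_alt M N A
instance (M : Int) (N : Int) (A : List Int) (out : Int) : Decidable (Spec_solve M N A out) := by unfold Spec_solve; infer_instance

-- ===== CLAIM (what is proved, stated in full; the proofs are below) =====
def Claim_equal_solve : Prop := ∀ (M : Int) (N : Int) (A : List Int), Dom_solve M N A → Pre_solve M N A → Spec_solve M N A (solve M N A)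

-- ===== LEMMAS AND PROOFS =====

-- the coin alphabet: strictly positive coins below the modulus K (which is ≥ 1 and « INF)
def pvCoinsOK (K : Int) (C : List Int) : Prop :=
  1 ≤ K ∧ K < pvINF ∧ ∀ c ∈ C, 0 ≤ c ∧ c < K

-- walks from residue 0: cost d, visited vertices vs (reverse-chronological, head = endpoint)
inductive pvW (K : Int) (C : List Int) : Int → Int → List Int → Prop
  | zero : pvW K C 0 0 [0]
  | step1 {u d vs c} : pvW K C u d vs → c ∈ C → u + c < K → pvW K C (u + c) (d + 1) ((u + c) :: vs)
  | step0 {u d vs c} : pvW K C u d vs → c ∈ C → K ≤ u + c → pvW K C (u + c - K) d ((u + c - K) :: vs)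

-- same walks, counting edges instead of recording vertices
inductive pvWN (K : Int) (C : List Int) : Int → Int → Nat → Prop
  | zero : pvWN K C 0 0 0
  | step1 {u d n c} : pvWN K C u d n → c ∈ C → u + c < K → pvWN K C (u + c) (d + 1) (n + 1)
  | step0 {u d n c} : pvWN K C u d n → c ∈ C → K ≤ u + c → pvWN K C (u + c - K) d (n + 1)

def pvReach (K : Int) (C : List Int) (v : Int) : Prop := ∃ d vs, pvW K C v d vs
def pvIsMin (K : Int) (C : List Int) (v dm : Int) : Prop :=
  (∃ vs, pvW K C v dm vs) ∧ ∀ d vs, pvW K C v d vs → dm ≤ d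

def pvG (m : Array Int) (v : Int) : Int := m.getD v.toNat 0

-- all of u's outgoing edges are relaxed in m
def pvExp (K : Int) (C : List Int) (m : Array Int) (u : Int) : Prop :=
  ∀ c ∈ C, if u + c < K then pvG m (u + c) ≤ pvG m u + 1 else pvG m (u + c - K) ≤ pvG m u

-- the 0-1-BFS loop invariant
def pvInv (K R : Int) (C : List Int) (q : List (Int × Int)) (m : Array Int) : Prop :=
  m.size = K.toNat ∧
  (∃ L q1 q2, q = q1 ++ q2 ∧ (∀ p ∈ q1, p.2 = L) ∧ (∀ p ∈ q2, p.2 = L + 1)) ∧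
  (∀ p ∈ q, 0 ≤ p.1 ∧ p.1 < K ∧ (∃ vs, pvW K C p.1 p.2 vs) ∧ pvG m p.1 ≤ p.2) ∧
  (∀ v, 0 ≤ v → v < K → 0 ≤ pvG m v) ∧
  pvG m 0 = 0 ∧
  (∀ v, 0 ≤ v → v < K →
    pvG m v = pvINF ∨ ((∃ vs, pvW K C v (pvG m v) vs) ∧ (((v, pvG m v) ∈ q) ∨ pvExp K C m v))) ∧
  (pvG m R < pvINF → (R, pvG m R) ∈ q)

def pvMu (q : List (Int × Int)) (m : Array Int) : Nat := q.length + (m.toList.map Int.toNat).sum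

theorem pvW_basic {K : Int} {C : List Int} (h : pvCoinsOK K C) {v d : Int} {vs : List Int}
    (w : pvW K C v d vs) : (0 ≤ v ∧ v < K) ∧ 0 ≤ d ∧ d + 1 ≤ (vs.length : Int) ∧
      ∀ x ∈ vs, 0 ≤ x ∧ x < K := by
  obtain ⟨hK1, -, hC⟩ := h
  induction w with
  | zero => simp; omega
  | step1 w hc hlt ih =>
    obtain ⟨hv, hd, hlen, hmem⟩ := ih
    have hcc := hC _ hc
    refine ⟨⟨by omega, hlt⟩, by omega, by push_cast [List.length_cons]; omega, ?_⟩
    intro x hx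
    rcases List.mem_cons.mp hx with rfl | hx
    · exact ⟨by omega, hlt⟩
    · exact hmem x hx
  | step0 w hc hge ih =>
    obtain ⟨hv, hd, hlen, hmem⟩ := ih
    have hcc := hC _ hc
    refine ⟨⟨by omega, by omega⟩, by omega, by push_cast [List.length_cons]; omega, ?_⟩
    intro x hx
    rcases List.mem_cons.mp hx with rfl | hx
    · exact ⟨by omega, by omega⟩
    · exact hmem x hx

theorem pvW_prefix {K : Int} {C : List Int} {v d : Int} {vs : List Int}
    (w : pvW K C v d vs) : ∀ u ∈ vs, ∃ d' vs', pvW K C u d' vs' ∧ d' ≤ d ∧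
      vs'.length ≤ vs.length ∧ ∀ x ∈ vs', x ∈ vs := by
  induction w with
  | zero =>
    intro u hu; simp at hu; subst hu
    exact ⟨0, [0], pvW.zero, le_refl _, le_refl _, fun x hx => hx⟩
  | step1 w hc hlt ih =>
    intro x hx
    rcases List.mem_cons.mp hx with rfl | hx
    · exact ⟨_, _, w.step1 hc hlt, le_refl _, le_refl _, fun y hy => hy⟩
    · obtain ⟨d', vs', w', hd', hl', hs'⟩ := ih x hx
      exact ⟨d', vs', w', by omega, by simp [List.length_cons]; omega,
        fun y hy => List.mem_cons_of_mem _ (hs' y hy)⟩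
  | step0 w hc hge ih =>
    intro x hx
    rcases List.mem_cons.mp hx with rfl | hx
    · exact ⟨_, _, w.step0 hc hge, le_refl _, le_refl _, fun y hy => hy⟩
    · obtain ⟨d', vs', w', hd', hl', hs'⟩ := ih x hx
      exact ⟨d', vs', w', hd', by simp [List.length_cons]; omega,
        fun y hy => List.mem_cons_of_mem _ (hs' y hy)⟩

theorem pvW_shorten_aux {K : Int} {C : List Int} :
    ∀ (n : Nat) {v d : Int} {vs : List Int}, vs.length ≤ n → pvW K C v d vs →
      ∃ d' vs', pvW K C v d' vs' ∧ d' ≤ d ∧ vs'.Nodup ∧ ∀ x ∈ vs', x ∈ vs := by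
  intro n
  induction n with
  | zero =>
    intro v d vs hlen w
    cases w <;> simp at hlen
  | succ n ih =>
    intro v d vs hlen w
    cases w with
    | zero => exact ⟨0, [0], pvW.zero, le_refl _, by simp, fun x hx => hx⟩
    | @step1 u d0 vs0 c w hc hlt =>
      simp [List.length_cons] at hlen
      by_cases hmem : (u + c) ∈ vs0
      · obtain ⟨d', vs', w', hd', hl', hs'⟩ := pvW_prefix w _ hmem
        obtain ⟨d2, vs2, w2, hd2, hnd, hs2⟩ := ih (by omega) w'
        exact ⟨d2, vs2, w2, by omega, hnd,
          fun x hx => List.mem_cons_of_mem _ (hs' x (hs2 x hx))⟩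
      · obtain ⟨d2, vs2, w2, hd2, hnd, hs2⟩ := ih (by omega) w
        refine ⟨d2 + 1, (u + c) :: vs2, w2.step1 hc hlt, by omega,
          List.nodup_cons.mpr ⟨fun hx => hmem (hs2 _ hx), hnd⟩, ?_⟩
        intro x hx
        rcases List.mem_cons.mp hx with rfl | hx
        · exact List.mem_cons_self
        · exact List.mem_cons_of_mem _ (hs2 x hx)
    | @step0 u d0 vs0 c w hc hge =>
      simp [List.length_cons] at hlen
      by_cases hmem : (u + c - K) ∈ vs0
      · obtain ⟨d', vs', w', hd', hl', hs'⟩ := pvW_prefix w _ hmem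
        obtain ⟨d2, vs2, w2, hd2, hnd, hs2⟩ := ih (by omega) w'
        exact ⟨d2, vs2, w2, by omega, hnd,
          fun x hx => List.mem_cons_of_mem _ (hs' x (hs2 x hx))⟩
      · obtain ⟨d2, vs2, w2, hd2, hnd, hs2⟩ := ih (by omega) w
        refine ⟨d2, (u + c - K) :: vs2, w2.step0 hc hge, hd2,
          List.nodup_cons.mpr ⟨fun hx => hmem (hs2 _ hx), hnd⟩, ?_⟩
        intro x hx
        rcases List.mem_cons.mp hx with rfl | hx
        · exact List.mem_cons_self
        · exact List.mem_cons_of_mem _ (hs2 x hx)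

theorem pvW_shorten {K : Int} {C : List Int} {v d : Int} {vs : List Int}
    (w : pvW K C v d vs) : ∃ d' vs', pvW K C v d' vs' ∧ d' ≤ d ∧ vs'.Nodup ∧
      ∀ x ∈ vs', x ∈ vs :=
  pvW_shorten_aux vs.length (le_refl _) w

theorem pvW_toWN {K : Int} {C : List Int} {v d : Int} {vs : List Int}
    (w : pvW K C v d vs) : ∃ n, pvWN K C v d n ∧ n + 1 = vs.length := by
  induction w with
  | zero => exact ⟨0, pvWN.zero, by simp⟩
  | step1 w hc hlt ih =>
    obtain ⟨n, wn, hn⟩ := ih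
    exact ⟨n + 1, wn.step1 hc hlt, by simp [List.length_cons, hn]⟩
  | step0 w hc hge ih =>
    obtain ⟨n, wn, hn⟩ := ih
    exact ⟨n + 1, wn.step0 hc hge, by simp [List.length_cons, hn]⟩

theorem pvWN_range {K : Int} {C : List Int} (h : pvCoinsOK K C) {v d : Int} {n : Nat}
    (w : pvWN K C v d n) : (0 ≤ v ∧ v < K) ∧ 0 ≤ d := by
  obtain ⟨hK1, -, hC⟩ := h
  induction w with
  | zero => omega
  | step1 w hc hlt ih => have := hC _ hc; omega
  | step0 w hc hge ih => have := hC _ hc; omega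

-- a minimum-cost walk exists as soon as any walk does
theorem pvMin_exists {K : Int} {C : List Int} (h : pvCoinsOK K C) {v : Int}
    (hr : pvReach K C v) : ∃ dm, pvIsMin K C v dm := by
  obtain ⟨d0, vs0, w0⟩ := hr
  obtain ⟨lb, ⟨vs, hvs⟩, hleast⟩ :=
    Int.exists_least_of_bdd (P := fun d => ∃ vs, pvW K C v d vs)
      ⟨0, fun z ⟨vs, w⟩ => (pvW_basic h w).2.1⟩ ⟨d0, vs0, w0⟩
  exact ⟨lb, ⟨vs, hvs⟩, fun d vs' w' => hleast d ⟨vs', w'⟩⟩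

-- the minimum cost is realised by a duplicate-free walk, hence is at most K - 1
theorem pvNodup_len {K : Int} (hK : 1 ≤ K) {vs : List Int} (hnd : vs.Nodup)
    (hmem : ∀ x ∈ vs, 0 ≤ x ∧ x < K) : vs.length ≤ K.toNat := by
  classical
  have hsub : vs.toFinset ⊆ Finset.Ico (0 : Int) K := by
    intro x hx
    have := hmem x (List.mem_toFinset.mp hx)
    simp [Finset.mem_Ico]; omega
  have h1 := Finset.card_le_card hsub
  rw [List.toFinset_card_of_nodup hnd, Int.card_Ico] at h1
  omega

theorem pvMin_le {K : Int} {C : List Int} (h : pvCoinsOK K C) {v dm : Int}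
    (hm : pvIsMin K C v dm) : dm ≤ K - 1 ∧ ∃ n, pvWN K C v dm n ∧ (n : Int) ≤ K - 1 := by
  obtain ⟨⟨vs, w⟩, hmin⟩ := hm
  obtain ⟨d', vs', w', hd', hnd, hsub⟩ := pvW_shorten w
  have heq : d' = dm := le_antisymm hd' (hmin _ _ w')
  subst heq
  have hb := pvW_basic h w'
  have hlen := pvNodup_len h.1 hnd hb.2.2.2
  obtain ⟨n, wn, hn⟩ := pvW_toWN w'
  have hKt : (K.toNat : Int) = K := Int.toNat_of_nonneg (by omega)
  refine ⟨by omega, n, wn, by omega⟩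

-- every walk of cost < INF that is cheap enough is dominated by memo or by a queue entry
theorem pvChain {K R : Int} {C : List Int} {q : List (Int × Int)} {m : Array Int}
    (hOK : pvCoinsOK K C) (hInv : pvInv K R C q m) :
    ∀ {v d : Int} {n : Nat}, pvWN K C v d n → d ≤ K - 1 →
      pvG m v ≤ d ∨ ∃ p ∈ q, p.2 ≤ d := by
  obtain ⟨hlen, hshape, hqmem, hnn, h0, hval, hR⟩ := hInv
  intro v d n w
  induction w with
  | zero => intro _; left; omega
  | @step1 u d0 n0 c w hc hlt ih =>
    intro hd
    rcases ih (by omega) with hm | ⟨p, hp, hple⟩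
    · have hur := pvWN_range hOK w
      rcases hval u hur.1.1 hur.1.2 with hINF | ⟨-, hq | hexp⟩
      · exfalso; have := hOK.2.1; omega
      · exact Or.inr ⟨_, hq, by omega⟩
      · have := hexp c hc
        rw [if_pos hlt] at this
        left; omega
    · exact Or.inr ⟨p, hp, by omega⟩
  | @step0 u d0 n0 c w hc hge ih =>
    intro hd
    rcases ih (by omega) with hm | ⟨p, hp, hple⟩
    · have hur := pvWN_range hOK w
      rcases hval u hur.1.1 hur.1.2 with hINF | ⟨-, hq | hexp⟩
      · exfalso; have := hOK.2.1; omega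
      · exact Or.inr ⟨_, hq, by omega⟩
      · have := hexp c hc
        rw [if_neg (by omega)] at this
        left; omega
    · exact Or.inr ⟨p, hp, by omega⟩

-- ===== small helpers about pvG / pySetD / sums =====

theorem pvG_eq_getElem {m : Array Int} {x : Int} (h0 : 0 ≤ x) (hx : x.toNat < m.size) :
    pvG m x = m[x.toNat] := by
  unfold pvG
  rw [Array.getD_eq_getD_getElem?, Array.getElem?_eq_getElem hx]
  rfl

theorem pvG_set {m : Array Int} {j : Nat} {v x : Int} (hx0 : 0 ≤ x) (hxl : x.toNat < m.size) :
    pvG (m.setIfInBounds j v) x = if x.toNat = j then v else pvG m x := by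
  rw [pvG_eq_getElem hx0 (by simpa using hxl), Array.getElem_setIfInBounds]
  split_ifs with h1 h2 h2
  · rfl
  · exact absurd h1.symm h2
  · exact absurd h2.symm h1
  · exact (pvG_eq_getElem hx0 hxl).symm

theorem pvSum_set_nat : ∀ (l : List Nat) (n : Nat) (a : Nat), n < l.length →
    (l.set n a).sum + l.getD n 0 = l.sum + a := by
  intro l
  induction l with
  | nil => intro n a h; simp at h
  | cons x xs ih =>
    intro n a h
    cases n with
    | zero => simp [List.set]; omega
    | succ n =>
      simp only [List.set, List.sum_cons, List.getD_cons_succ]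
      have := ih n a (by simpa using Nat.lt_of_succ_lt_succ h)
      omega

theorem pvSum_set {m : Array Int} {j : Nat} {v : Int} (hj : j < m.size) (hv0 : 0 ≤ v)
    (hlt : v < m[j]) :
    ((m.setIfInBounds j v).toList.map Int.toNat).sum + 1 ≤ (m.toList.map Int.toNat).sum := by
  rw [Array.toList_setIfInBounds, List.map_set]
  have hjl : j < m.toList.length := by rw [Array.length_toList]; exact hj
  have hs := pvSum_set_nat (m.toList.map Int.toNat) j v.toNat (by simpa using hjl)
  have hg : (m.toList.map Int.toNat).getD j 0 = m[j].toNat := by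
    rw [List.getD_eq_getElem _ _ (by simpa using hjl), List.getElem_map, Array.getElem_toList]
  rw [hg] at hs
  omega

theorem pvModK {x K : Int} (hK : 1 ≤ K) (h1 : K ≤ x) (h2 : x < 2 * K) :
    PySem.Int.mod x K = x - K := by
  rw [PySem.Int.mod_eq_emod_of_pos (by omega)]
  have h4 : (x - K) % K = x % K := by
    have := Int.add_mul_emod_self_left (a := x - K) (b := K) (c := 1)
    simpa using this
  rw [← h4, Int.emod_eq_of_lt (by omega) (by omega)]

theorem pvG_def (m : Array Int) (v : Int) : m.getD v.toNat 0 = pvG m v := rfl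

theorem pvExp_mono {K : Int} {C : List Int} {m m' : Array Int} {v : Int} (hOK : pvCoinsOK K C)
    (hv0 : 0 ≤ v) (hvK : v < K) (hpt : ∀ x, 0 ≤ x → x < K → pvG m' x ≤ pvG m x)
    (hsame : pvG m' v = pvG m v) (he : pvExp K C m v) : pvExp K C m' v := by
  intro c hc
  have hc' := hOK.2.2 c hc
  have h := he c hc
  split_ifs with hb
  · rw [if_pos hb] at h
    have := hpt (v + c) (by omega) hb
    omega
  · rw [if_neg hb] at h
    have := hpt (v + c - K) (by omega) (by omega)
    omega

-- ===== the generalized invariant carried through A's inner for-loop =====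

def pvGI (K R u du : Int) (C done : List Int) (m : Array Int) (rest : List (Int × Int))
    (r1 r2 : List (Int × Int)) (st : Array Int × List (Int × Int)) : Prop :=
  st.1.size = K.toNat ∧
  (∀ v, 0 ≤ v → v < K → pvG st.1 v ≤ pvG m v) ∧
  (∀ v, 0 ≤ v → v < K → 0 ≤ pvG st.1 v) ∧
  pvG st.1 0 = 0 ∧
  (∃ f b, st.2 = f ++ (r1 ++ r2) ++ b ∧ (∀ p ∈ f, p.2 = du) ∧ (∀ p ∈ b, p.2 = du + 1)) ∧
  (∀ p ∈ st.2, 0 ≤ p.1 ∧ p.1 < K ∧ (∃ vs, pvW K C p.1 p.2 vs) ∧ pvG st.1 p.1 ≤ p.2) ∧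
  (∀ v, 0 ≤ v → v < K → v ≠ u →
    pvG st.1 v = pvINF ∨ ((∃ vs, pvW K C v (pvG st.1 v) vs) ∧ (((v, pvG st.1 v) ∈ st.2) ∨ pvExp K C st.1 v))) ∧
  (pvG st.1 u = pvG m u ∧
    ((du = pvG m u ∧ ∀ c ∈ done, (if u + c < K then pvG st.1 (u + c) ≤ du + 1 else pvG st.1 (u + c - K) ≤ du))
      ∨ (pvG st.1 u = pvINF ∨ ((∃ vs, pvW K C u (pvG st.1 u) vs) ∧ (((u, pvG st.1 u) ∈ st.2) ∨ pvExp K C st.1 u))))) ∧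
  (pvG st.1 R < pvINF → (R, pvG st.1 R) ∈ st.2) ∧
  (st.2.length + (st.1.toList.map Int.toNat).sum ≤ rest.length + (m.toList.map Int.toNat).sum)

theorem pvGI_step {K R u du : Int} {C : List Int} {m : Array Int} {rest r1 r2 : List (Int × Int)}
    (hOK : pvCoinsOK K C) (hu0 : 0 ≤ u) (huK : u < K) (hdu0 : 0 ≤ du)
    (hwu : ∃ vs, pvW K C u du vs) (hmle : pvG m u ≤ du) (hR0 : 0 ≤ R) (hRK : R < K)
    {done : List Int} (hdC : ∀ x ∈ done, x ∈ C) {st : Array Int × List (Int × Int)}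
    {c : Int} (hc : c ∈ C) (hgi : pvGI K R u du C done m rest r1 r2 st) :
    pvGI K R u du C (done ++ [c]) m rest r1 r2 (pvRelaxA K u du st c) := by
  obtain ⟨m', q'⟩ := st
  obtain ⟨hlen, hpt, hnn, h0, ⟨f, b, hq, hf, hb⟩, hqmem, hval, ⟨hagu, hucl⟩, hR, hmu⟩ := hgi
  dsimp only at hlen hpt hnn h0 hq hqmem hval hagu hucl hR hmu
  have hc' := hOK.2.2 c hc
  have hK1 := hOK.1
  simp only [pvRelaxA, pvG_def]
  by_cases hlt : u + c < K
  · rw [if_pos hlt]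
    by_cases hskip : pvG m' (u + c) ≤ du + 1
    · rw [if_pos hskip]
      refine ⟨hlen, hpt, hnn, h0, ⟨f, b, hq, hf, hb⟩, hqmem, hval, ⟨hagu, ?_⟩, hR, hmu⟩
      rcases hucl with ⟨hdueq, hdone⟩ | hother
      · refine Or.inl ⟨hdueq, ?_⟩
        intro c' hc''
        rcases List.mem_append.mp hc'' with hc'' | hc''
        · exact hdone c' hc''
        · have hcc : c' = c := by simpa using hc''
          subst hcc
          rw [if_pos hlt]; exact hskip
      · exact Or.inr hother
    · rw [if_neg hskip]
      push_neg at hskip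
      unfold pvGI
      dsimp only
      -- update branch: memo[u+c] := du+1, push (u+c, du+1) at the back
      have htl : (u + c).toNat < m'.size := by rw [hlen]; omega
      have hset : ∀ x, 0 ≤ x → x < K →
          pvG (m'.setIfInBounds (u + c).toNat (du + 1)) x = if x = u + c then du + 1 else pvG m' x := by
        intro x hx0 hxK
        rw [pvG_set hx0 (by rw [hlen]; omega)]
        by_cases h : x = u + c
        · rw [if_pos (by omega), if_pos h]
        · rw [if_neg (by omega), if_neg h]
      have hlen' : (m'.setIfInBounds (u + c).toNat (du + 1)).size = K.toNat := by
        rw [Array.size_setIfInBounds]; exact hlen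
      have hpt' : ∀ x, 0 ≤ x → x < K →
          pvG (m'.setIfInBounds (u + c).toNat (du + 1)) x ≤ pvG m' x := by
        intro x hx0 hxK; rw [hset x hx0 hxK]
        split_ifs with he
        · subst he; omega
        · exact le_refl _
      have hne0 : (0 : Int) ≠ u + c := by
        intro h
        rw [← h] at hskip
        omega
      have hneu : u ≠ u + c := by
        intro h
        rw [← h, hagu] at hskip
        omega
      obtain ⟨vsu, wu⟩ := hwu
      have hwnew : pvW K C (u + c) (du + 1) ((u + c) :: vsu) := wu.step1 hc hlt
      refine ⟨hlen', ?_, ?_, ?_, ?_, ?_, ?_, ?_, ?_, ?_⟩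
      · intro v hv0 hvK
        exact le_trans (hpt' v hv0 hvK) (hpt v hv0 hvK)
      · intro v hv0 hvK
        rw [hset v hv0 hvK]; split_ifs with he
        · omega
        · exact hnn v hv0 hvK
      · rw [hset 0 (le_refl _) (by omega), if_neg hne0]; exact h0
      · exact ⟨f, b ++ [(u + c, du + 1)], by rw [hq]; simp, hf, by
          intro p hp
          rcases List.mem_append.mp hp with hp | hp
          · exact hb p hp
          · simp at hp; rw [hp]⟩
      · intro p hp
        rcases List.mem_append.mp hp with hp | hp
        · obtain ⟨hp1, hp2, hp3, hp4⟩ := hqmem p hp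
          exact ⟨hp1, hp2, hp3, le_trans (hpt' p.1 hp1 hp2) hp4⟩
        · simp at hp; rw [hp]
          refine ⟨by omega, hlt, ⟨_, hwnew⟩, ?_⟩
          rw [hset (u + c) (by omega) hlt, if_pos rfl]
      · intro v hv0 hvK hvu
        by_cases hvc : v = u + c
        · subst hvc
          rw [hset _ hv0 hvK, if_pos rfl]
          exact Or.inr ⟨⟨_, hwnew⟩, Or.inl (by simp)⟩
        · rw [hset _ hv0 hvK, if_neg hvc]
          rcases hval v hv0 hvK hvu with hI | ⟨hw, hq2 | hexp⟩
          · exact Or.inl hI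
          · exact Or.inr ⟨hw, Or.inl (by simp [hq2])⟩
          · exact Or.inr ⟨hw, Or.inr (pvExp_mono hOK hv0 hvK hpt'
              (by rw [hset _ hv0 hvK, if_neg hvc]) hexp)⟩
      · have hagu' : pvG (m'.setIfInBounds (u + c).toNat (du + 1)) u = pvG m' u := by
          rw [hset u hu0 huK, if_neg hneu]
        refine ⟨by rw [hagu', hagu], ?_⟩
        rcases hucl with ⟨hdueq, hdone⟩ | hother
        · refine Or.inl ⟨hdueq, ?_⟩
          intro c' hc''
          rcases List.mem_append.mp hc'' with hc'' | hc''
          · have := hdone c' hc''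
            split_ifs at this ⊢ with hbr
            · exact le_trans (hpt' _ (by have := hOK.2.2 c' (hdC c' hc''); omega) hbr) this
            · have hcr := hOK.2.2 c' (hdC c' hc'')
              exact le_trans (hpt' _ (by omega) (by omega)) this
          · have hcc : c' = c := by simpa using hc''
            rw [hcc, if_pos hlt, hset (u + c) (by omega) hlt, if_pos rfl]
        · rcases hother with hI | ⟨hw, hq2 | hexp⟩
          · exact Or.inr (Or.inl (by rw [hagu']; exact hI))
          · exact Or.inr (Or.inr ⟨by rw [hagu']; exact hw, Or.inl (by rw [hagu']; simp [hq2])⟩)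
          · exact Or.inr (Or.inr ⟨by rw [hagu']; exact hw,
              Or.inr (pvExp_mono hOK hu0 huK hpt' hagu' hexp)⟩)
      · intro hRlt
        by_cases hRc : R = u + c
        · rw [hset R hR0 hRK, if_pos hRc] at hRlt ⊢
          simp [hRc]
        · rw [hset R hR0 hRK, if_neg hRc] at hRlt ⊢
          exact List.mem_append_left _ (hR hRlt)
      · have := pvSum_set (m := m') (j := (u + c).toNat) (v := du + 1) htl (by omega)
          (by rw [← pvG_eq_getElem (by omega) htl]; exact hskip)
        rw [hq] at hmu ⊢
        simp only [List.length_append, List.length_cons] at hmu ⊢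
        simp at this ⊢
        omega
  · rw [if_neg hlt]
    push_neg at hlt
    have hmod : PySem.Int.mod (u + c) K = u + c - K := pvModK hK1 hlt (by omega)
    rw [hmod]
    by_cases hskip : pvG m' (u + c - K) ≤ du
    · rw [if_pos hskip]
      refine ⟨hlen, hpt, hnn, h0, ⟨f, b, hq, hf, hb⟩, hqmem, hval, ⟨hagu, ?_⟩, hR, hmu⟩
      rcases hucl with ⟨hdueq, hdone⟩ | hother
      · refine Or.inl ⟨hdueq, ?_⟩
        intro c' hc''
        rcases List.mem_append.mp hc'' with hc'' | hc''
        · exact hdone c' hc''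
        · have hcc : c' = c := by simpa using hc''
          subst hcc
          rw [if_neg (by omega)]; exact hskip
      · exact Or.inr hother
    · rw [if_neg hskip]
      push_neg at hskip
      unfold pvGI
      dsimp only
      have ht0 : 0 ≤ u + c - K := by omega
      have htK : u + c - K < K := by omega
      have htl : (u + c - K).toNat < m'.size := by rw [hlen]; omega
      have hset : ∀ x, 0 ≤ x → x < K →
          pvG (m'.setIfInBounds (u + c - K).toNat du) x = if x = u + c - K then du else pvG m' x := by
        intro x hx0 hxK
        rw [pvG_set hx0 (by rw [hlen]; omega)]
        by_cases h : x = u + c - K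
        · rw [if_pos (by omega), if_pos h]
        · rw [if_neg (by omega), if_neg h]
      have hlen' : (m'.setIfInBounds (u + c - K).toNat du).size = K.toNat := by
        rw [Array.size_setIfInBounds]; exact hlen
      have hpt' : ∀ x, 0 ≤ x → x < K →
          pvG (m'.setIfInBounds (u + c - K).toNat du) x ≤ pvG m' x := by
        intro x hx0 hxK; rw [hset x hx0 hxK]
        split_ifs with he
        · subst he; omega
        · exact le_refl _
      have hne0 : (0 : Int) ≠ u + c - K := by
        intro h
        rw [← h] at hskip
        omega
      have hneu : u ≠ u + c - K := by omega
      obtain ⟨vsu, wu⟩ := hwu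
      have hwnew : pvW K C (u + c - K) du ((u + c - K) :: vsu) := wu.step0 hc hlt
      refine ⟨hlen', ?_, ?_, ?_, ?_, ?_, ?_, ?_, ?_, ?_⟩
      · intro v hv0 hvK
        exact le_trans (hpt' v hv0 hvK) (hpt v hv0 hvK)
      · intro v hv0 hvK
        rw [hset v hv0 hvK]; split_ifs with he
        · omega
        · exact hnn v hv0 hvK
      · rw [hset 0 (le_refl _) (by omega), if_neg hne0]; exact h0
      · exact ⟨(u + c - K, du) :: f, b, by rw [hq]; simp, by
          intro p hp
          rcases List.mem_cons.mp hp with hp | hp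
          · rw [hp]
          · exact hf p hp, hb⟩
      · intro p hp
        rcases List.mem_cons.mp hp with hp | hp
        · rw [hp]
          refine ⟨ht0, htK, ⟨_, hwnew⟩, ?_⟩
          rw [hset _ ht0 htK, if_pos rfl]
        · obtain ⟨hp1, hp2, hp3, hp4⟩ := hqmem p hp
          exact ⟨hp1, hp2, hp3, le_trans (hpt' p.1 hp1 hp2) hp4⟩
      · intro v hv0 hvK hvu
        by_cases hvc : v = u + c - K
        · subst hvc
          rw [hset _ hv0 hvK, if_pos rfl]
          exact Or.inr ⟨⟨_, hwnew⟩, Or.inl (by simp)⟩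
        · rw [hset _ hv0 hvK, if_neg hvc]
          rcases hval v hv0 hvK hvu with hI | ⟨hw, hq2 | hexp⟩
          · exact Or.inl hI
          · exact Or.inr ⟨hw, Or.inl (by simp [hq2])⟩
          · exact Or.inr ⟨hw, Or.inr (pvExp_mono hOK hv0 hvK hpt'
              (by rw [hset _ hv0 hvK, if_neg hvc]) hexp)⟩
      · have hagu' : pvG (m'.setIfInBounds (u + c - K).toNat du) u = pvG m' u := by
          rw [hset u hu0 huK, if_neg hneu]
        refine ⟨by rw [hagu', hagu], ?_⟩
        rcases hucl with ⟨hdueq, hdone⟩ | hother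
        · refine Or.inl ⟨hdueq, ?_⟩
          intro c' hc''
          rcases List.mem_append.mp hc'' with hc'' | hc''
          · have := hdone c' hc''
            split_ifs at this ⊢ with hbr
            · exact le_trans (hpt' _ (by have := hOK.2.2 c' (hdC c' hc''); omega) hbr) this
            · have hcr := hOK.2.2 c' (hdC c' hc'')
              exact le_trans (hpt' _ (by omega) (by omega)) this
          · have hcc : c' = c := by simpa using hc''
            rw [hcc, if_neg (by omega), hset _ ht0 htK, if_pos rfl]
        · rcases hother with hI | ⟨hw, hq2 | hexp⟩
          · exact Or.inr (Or.inl (by rw [hagu']; exact hI))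
          · exact Or.inr (Or.inr ⟨by rw [hagu']; exact hw, Or.inl (by rw [hagu']; simp [hq2])⟩)
          · exact Or.inr (Or.inr ⟨by rw [hagu']; exact hw,
              Or.inr (pvExp_mono hOK hu0 huK hpt' hagu' hexp)⟩)
      · intro hRlt
        by_cases hRc : R = u + c - K
        · rw [hset R hR0 hRK, if_pos hRc] at hRlt ⊢
          simp [hRc]
        · rw [hset R hR0 hRK, if_neg hRc] at hRlt ⊢
          exact List.mem_cons_of_mem _ (hR hRlt)
      · have := pvSum_set (m := m') (j := (u + c - K).toNat) (v := du) htl (by omega)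
          (by rw [← pvG_eq_getElem ht0 htl]; exact hskip)
        rw [hq] at hmu ⊢
        simp only [List.length_append, List.length_cons] at hmu ⊢
        simp at this ⊢
        omega

theorem pvGI_fold {K R u du : Int} {C : List Int} {m : Array Int} {rest r1 r2 : List (Int × Int)}
    (hOK : pvCoinsOK K C) (hu0 : 0 ≤ u) (huK : u < K) (hdu0 : 0 ≤ du)
    (hwu : ∃ vs, pvW K C u du vs) (hmle : pvG m u ≤ du) (hR0 : 0 ≤ R) (hRK : R < K) :
    ∀ (r done : List Int) (st : Array Int × List (Int × Int)), done ++ r = C →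
      pvGI K R u du C done m rest r1 r2 st →
      pvGI K R u du C C m rest r1 r2 (r.foldl (pvRelaxA K u du) st) := by
  intro r
  induction r with
  | nil =>
    intro done st hdc hgi
    simp at hdc
    subst hdc
    exact hgi
  | cons c r ih =>
    intro done st hdc hgi
    have hdC : ∀ x ∈ done, x ∈ C := by
      intro x hx; rw [← hdc]; exact List.mem_append_left _ hx
    have hc : c ∈ C := by rw [← hdc]; simp
    have hstep := pvGI_step hOK hu0 huK hdu0 hwu hmle hR0 hRK hdC hc hgi
    have := ih (done ++ [c]) (pvRelaxA K u du st c) (by rw [← hdc]; simp) hstep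
    simpa using this

-- one pop + full inner loop preserves the invariant and strictly decreases the measure
theorem pvStep {K R : Int} {C : List Int} {u du : Int} {rest : List (Int × Int)} {m : Array Int}
    (hOK : pvCoinsOK K C) (hR0 : 0 ≤ R) (hRK : R < K)
    (hInv : pvInv K R C ((u, du) :: rest) m) (hne : u ≠ R) :
    pvInv K R C (C.foldl (pvRelaxA K u du) (m, rest)).2 (C.foldl (pvRelaxA K u du) (m, rest)).1 ∧
    pvMu (C.foldl (pvRelaxA K u du) (m, rest)).2 (C.foldl (pvRelaxA K u du) (m, rest)).1 <
      pvMu ((u, du) :: rest) m := by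
  obtain ⟨hlen, ⟨L, q1, q2, hq, h1, h2⟩, hqmem, hnn, h0, hval, hR⟩ := hInv
  obtain ⟨hu0, huK, hwu, hmu_le⟩ := hqmem (u, du) List.mem_cons_self
  have hdu0 : 0 ≤ du := by
    obtain ⟨vs, w⟩ := hwu
    exact (pvW_basic hOK w).2.1
  -- split rest into a du-block followed by a (du+1)-block
  obtain ⟨r1, r2, hrest, hr1, hr2⟩ :
      ∃ r1 r2, rest = r1 ++ r2 ∧ (∀ p ∈ r1, p.2 = du) ∧ (∀ p ∈ r2, p.2 = du + 1) := by
    cases q1 with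
    | nil =>
      simp at hq
      refine ⟨rest, [], by simp, ?_, by simp⟩
      intro p hp
      have hd : du = L + 1 := by
        have := h2 (u, du) (by rw [← hq]; exact List.mem_cons_self)
        simpa using this
      have := h2 p (by rw [← hq]; exact List.mem_cons_of_mem _ hp)
      omega
    | cons a q1t =>
      rw [List.cons_append] at hq
      injection hq with ha hrest'
      have hd : du = L := by
        have := h1 a List.mem_cons_self
        rw [← ha] at this
        simpa using this
      refine ⟨q1t, q2, hrest', ?_, ?_⟩
      · intro p hp
        have := h1 p (List.mem_cons_of_mem _ hp)
        omega
      · intro p hp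
        have := h2 p hp
        omega
  have hgi0 : pvGI K R u du C [] m rest r1 r2 (m, rest) := by
    unfold pvGI
    dsimp only
    refine ⟨hlen, fun v _ _ => le_refl _, hnn, h0, ⟨[], [], by simpa using hrest, by simp, by simp⟩,
      ?_, ?_, ⟨rfl, ?_⟩, ?_, le_refl _⟩
    · intro p hp
      exact hqmem p (List.mem_cons_of_mem _ hp)
    · intro v hv0 hvK hvu
      rcases hval v hv0 hvK with hI | ⟨hw, hq2 | hexp⟩
      · exact Or.inl hI
      · rcases List.mem_cons.mp hq2 with he | he
        · exact absurd (congrArg Prod.fst he) (by simpa using hvu)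
        · exact Or.inr ⟨hw, Or.inl he⟩
      · exact Or.inr ⟨hw, Or.inr hexp⟩
    · by_cases hdueq : du = pvG m u
      · exact Or.inl ⟨hdueq, by simp⟩
      · rcases hval u hu0 huK with hI | ⟨hw, hq2 | hexp⟩
        · exact Or.inr (Or.inl hI)
        · rcases List.mem_cons.mp hq2 with he | he
          · exact absurd (congrArg Prod.snd he).symm (by simpa using hdueq)
          · exact Or.inr (Or.inr ⟨hw, Or.inl he⟩)
        · exact Or.inr (Or.inr ⟨hw, Or.inr hexp⟩)
    · intro hRlt
      rcases List.mem_cons.mp (hR hRlt) with he | he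
      · exact absurd (congrArg Prod.fst he) (by simpa using (Ne.symm hne))
      · exact he
  have hgi := pvGI_fold hOK hu0 huK hdu0 hwu hmu_le hR0 hRK C [] (m, rest) (by simp) hgi0
  obtain ⟨hlen', hpt', hnn', h0', ⟨f, b, hq', hf, hb⟩, hqmem', hval', ⟨hagu, hucl⟩, hR', hmu'⟩ := hgi
  refine ⟨⟨hlen', ⟨du, f ++ r1, r2 ++ b, by rw [hq']; simp, ?_, ?_⟩, hqmem', hnn', h0', ?_, hR'⟩, ?_⟩
  · intro p hp
    rcases List.mem_append.mp hp with hp | hp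
    · exact hf p hp
    · exact hr1 p hp
  · intro p hp
    rcases List.mem_append.mp hp with hp | hp
    · exact hr2 p hp
    · exact hb p hp
  · intro v hv0 hvK
    by_cases hvu : v = u
    · subst hvu
      rcases hucl with ⟨hdueq, hdone⟩ | hother
      · refine Or.inr ⟨?_, Or.inr ?_⟩
        · rw [hagu, ← hdueq]; exact hwu
        · intro c hcin
          have := hdone c hcin
          rw [hagu, ← hdueq]
          exact this
      · exact hother
    · exact hval' v hv0 hvK hvu
  · unfold pvMu
    rw [hrest] at hmu'
    simp only [List.length_cons, List.length_append] at hmu' ⊢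
    rw [hrest]
    simp only [List.length_append]
    omega

theorem pvFrontMin {K R : Int} {C : List Int} {p0 : Int × Int} {rest : List (Int × Int)}
    {m : Array Int} (hInv : pvInv K R C (p0 :: rest) m) : ∀ p ∈ p0 :: rest, p0.2 ≤ p.2 := by
  obtain ⟨-, ⟨L, q1, q2, hq, h1, h2⟩, -, -, -, -, -⟩ := hInv
  intro p hp
  cases q1 with
  | nil =>
    simp at hq
    have hhead := h2 p0 (by rw [← hq]; exact List.mem_cons_self)
    have hp2 := h2 p (by rw [← hq]; exact hp)
    omega
  | cons a q1t =>
    rw [List.cons_append] at hq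
    injection hq with ha hrest'
    have hd : p0.2 = L := by rw [ha]; exact h1 a List.mem_cons_self
    rcases List.mem_cons.mp hp with rfl | hp
    · exact le_refl _
    · rw [hrest'] at hp
      rcases List.mem_append.mp hp with hp | hp
      · have := h1 p (List.mem_cons_of_mem _ hp); omega
      · have := h2 p hp; omega

theorem pvPopR {K R ds : Int} {C : List Int} {rest : List (Int × Int)} {m : Array Int}
    (hOK : pvCoinsOK K C) (hInv : pvInv K R C ((R, ds) :: rest) m) {dm : Int}
    (hmin : pvIsMin K C R dm) : ds = dm := by
  have hhead := hInv.2.2.1 (R, ds) List.mem_cons_self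
  obtain ⟨-, -, ⟨vs, w⟩, -⟩ := hhead
  have hdm_le : dm ≤ ds := hmin.2 _ _ w
  obtain ⟨hdmK, n, wn, hnK⟩ := pvMin_le hOK hmin
  have hfm := pvFrontMin hInv
  have hKI := hOK.2.1
  rcases pvChain hOK hInv wn hdmK with hmem | ⟨p, hp, hple⟩
  · have hR := hInv.2.2.2.2.2.2
    have hentry := hR (by omega)
    have := hfm _ hentry
    simp at this
    omega
  · have := hfm p hp
    simp at this
    omega

theorem pvLoopA_correct {M K R : Int} {C : List Int} (hOK : pvCoinsOK K C)
    (hR0 : 0 ≤ R) (hRK : R < K) :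
    ∀ (fuel : Nat) (q : List (Int × Int)) (m : Array Int), pvInv K R C q m → pvMu q m < fuel →
      (∀ dm, pvIsMin K C R dm → pvLoopA M K R C fuel q m = dm + PySem.Int.floordiv M K) ∧
      (¬ pvReach K C R → pvLoopA M K R C fuel q m = M) := by
  intro fuel
  induction fuel with
  | zero => intro q m hInv hmu; exact absurd hmu (by omega)
  | succ fuel ih =>
    intro q m hInv hmu
    cases q with
    | nil =>
      constructor
      · intro dm hmin
        exfalso
        obtain ⟨hdmK, n, wn, hnK⟩ := pvMin_le hOK hmin
        have hKI := hOK.2.1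
        rcases pvChain hOK hInv wn hdmK with hmem | ⟨p, hp, -⟩
        · have hR := hInv.2.2.2.2.2.2
          have := hR (by omega)
          simp at this
        · simp at hp
      · intro _; rfl
    | cons p rest =>
      obtain ⟨num, dist⟩ := p
      by_cases hnum : num = R
      · rw [hnum] at hInv
        have hred : pvLoopA M K R C (fuel + 1) ((num, dist) :: rest) m =
            dist + PySem.Int.floordiv M K := by
          simp [pvLoopA, hnum]
        constructor
        · intro dm hmin
          rw [hred, pvPopR hOK hInv hmin]
        · intro hnr
          exfalso
          obtain ⟨-, -, ⟨vs, w⟩, -⟩ := hInv.2.2.1 (R, dist) List.mem_cons_self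
          exact hnr ⟨dist, vs, w⟩
      · have hstep := pvStep hOK hR0 hRK hInv hnum
        have hred : pvLoopA M K R C (fuel + 1) ((num, dist) :: rest) m =
            pvLoopA M K R C fuel (C.foldl (pvRelaxA K num dist) (m, rest)).2
              (C.foldl (pvRelaxA K num dist) (m, rest)).1 := by
          simp [pvLoopA, hnum]
        have hmu' : pvMu (C.foldl (pvRelaxA K num dist) (m, rest)).2
            (C.foldl (pvRelaxA K num dist) (m, rest)).1 < fuel := by
          have := hstep.2
          omega
        have := ih _ _ hstep.1 hmu'
        rw [hred]
        exact this

theorem pvInit {K R : Int} {C : List Int} (hK1 : 1 ≤ K) (hR0 : 0 ≤ R) (hRK : R < K) :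
    pvInv K R C [(0, 0)] ((Array.replicate K.toNat pvINF).setIfInBounds 0 0) ∧
    pvMu [(0, 0)] ((Array.replicate K.toNat pvINF).setIfInBounds 0 0) <
      2 + K.toNat * 9223372036854775807 := by
  have hlenr : (Array.replicate K.toNat pvINF).size = K.toNat := by simp
  have hmg : ∀ x, 0 ≤ x → x < K →
      pvG ((Array.replicate K.toNat pvINF).setIfInBounds 0 0) x =
        if x = 0 then 0 else pvINF := by
    intro x hx0 hxK
    rw [pvG_set hx0 (by rw [hlenr]; omega)]
    by_cases h : x = 0
    · rw [if_pos (by omega), if_pos h]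
    · rw [if_neg (by omega), if_neg h]
      rw [pvG_eq_getElem hx0 (by rw [hlenr]; omega), Array.getElem_replicate]
  have hINFpos : (0 : Int) < pvINF := by unfold pvINF; omega
  constructor
  · refine ⟨by simp [Array.size_setIfInBounds, hlenr], ⟨0, [(0, 0)], [], by simp, by simp, by simp⟩,
      ?_, ?_, ?_, ?_, ?_⟩
    · intro p hp
      simp at hp
      rw [hp]
      refine ⟨le_refl _, by omega, ⟨[0], pvW.zero⟩, ?_⟩
      rw [hmg 0 (le_refl _) (by omega)]
      simp
    · intro v hv0 hvK
      rw [hmg v hv0 hvK]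
      split_ifs <;> omega
    · rw [hmg 0 (le_refl _) (by omega)]; simp
    · intro v hv0 hvK
      rw [hmg v hv0 hvK]
      by_cases hv : v = 0
      · subst hv
        rw [if_pos rfl]
        exact Or.inr ⟨⟨[0], pvW.zero⟩, Or.inl (by simp)⟩
      · rw [if_neg hv]
        exact Or.inl rfl
    · intro hRlt
      rw [hmg R hR0 hRK] at hRlt
      by_cases hv : R = 0
      · subst hv
        rw [hmg 0 (le_refl _) (by omega)]
        simp
      · rw [if_neg hv] at hRlt
        omega
  · unfold pvMu
    rw [Array.toList_setIfInBounds]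
    have htll : (Array.replicate K.toNat pvINF).toList = List.replicate K.toNat pvINF := by
      simp
    rw [htll, List.map_set]
    have hs := pvSum_set_nat ((List.replicate K.toNat pvINF).map Int.toNat) 0 0
      (by simp; omega)
    have hrep : ((List.replicate K.toNat pvINF).map Int.toNat).sum =
        K.toNat * 9223372036854775807 := by
      rw [List.map_replicate, List.sum_replicate]
      simp [pvINF]
    have hg0 : ((List.replicate K.toNat pvINF).map Int.toNat).getD 0 0 =
        9223372036854775807 := by
      rw [List.getD_eq_getElem _ _ (by simp; omega)]
      simp [pvINF]
    simp only [List.length_cons, List.length_nil]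
    simp only [Int.toNat_zero] at *
    omega

-- ===== B-side lemmas =====

-- "achievability" invariant of the distance array
def pvBL (K : Int) (C : List Int) (m : Array Int) : Prop :=
  m.size = K.toNat ∧ (∀ v, 0 ≤ v → v < K → 0 ≤ pvG m v) ∧ pvG m 0 = 0 ∧
  ∀ v, 0 ≤ v → v < K → pvG m v = pvINF ∨ ∃ vs, pvW K C v (pvG m v) vs

theorem pvInnerB_one {K : Int} {C : List Int} {u du c : Int} (hOK : pvCoinsOK K C)
    (hu0 : 0 ≤ u) (huK : u < K) (hdu0 : 0 ≤ du) (hwu : ∃ vs, pvW K C u du vs)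
    (hc : c ∈ C) {s : Array Int × Bool} (hbl : pvBL K C s.1) :
    pvBL K C (pvInnerB K du u s c).1 ∧
    (∀ v, 0 ≤ v → v < K → pvG (pvInnerB K du u s c).1 v ≤ pvG s.1 v) ∧
    (if u + c < K then pvG (pvInnerB K du u s c).1 (u + c) ≤ du + 1
      else pvG (pvInnerB K du u s c).1 (u + c - K) ≤ du) ∧
    ((pvInnerB K du u s c).2 = false → (pvInnerB K du u s c).1 = s.1 ∧ s.2 = false) := by
  obtain ⟨dist, flag⟩ := s
  obtain ⟨hlen, hnn, h0, hval⟩ := hbl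
  dsimp only at hlen hnn h0 hval
  have hc' := hOK.2.2 c hc
  obtain ⟨vsu, wu⟩ := hwu
  simp only [pvInnerB, pvG_def]
  by_cases hlt : u + c < K
  · rw [if_pos hlt]
    by_cases hg : du + 1 < pvG dist (u + c)
    · rw [if_pos hg]
      have htl : (u + c).toNat < dist.size := by rw [hlen]; omega
      have hset : ∀ x, 0 ≤ x → x < K →
          pvG (dist.setIfInBounds (u + c).toNat (du + 1)) x = if x = u + c then du + 1 else pvG dist x := by
        intro x hx0 hxK
        rw [pvG_set hx0 (by rw [hlen]; omega)]
        by_cases h : x = u + c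
        · rw [if_pos (by omega), if_pos h]
        · rw [if_neg (by omega), if_neg h]
      have h0' : pvG dist 0 = 0 := h0
      refine ⟨⟨by simp [Array.size_setIfInBounds, hlen], ?_, ?_, ?_⟩, ?_, ?_, by simp⟩
      · intro v hv0 hvK
        rw [hset v hv0 hvK]; split_ifs with hv
        · omega
        · exact hnn v hv0 hvK
      · have hne0 : (0 : Int) ≠ u + c := by
          intro h
          rw [← h, h0] at hg
          omega
        rw [hset 0 (le_refl _) (by omega), if_neg hne0]; exact h0
      · intro v hv0 hvK
        rw [hset v hv0 hvK]
        by_cases hv : v = u + c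
        · subst hv; rw [if_pos rfl]; exact Or.inr ⟨_, wu.step1 hc hlt⟩
        · rw [if_neg hv]; exact hval v hv0 hvK
      · intro v hv0 hvK
        rw [hset v hv0 hvK]; split_ifs with hv
        · subst hv; omega
        · exact le_refl _
      · rw [if_pos hlt, hset (u + c) (by omega) hlt, if_pos rfl]
    · rw [if_neg hg]
      refine ⟨⟨hlen, hnn, h0, hval⟩, fun v _ _ => le_refl _, ?_, fun h => ⟨rfl, h⟩⟩
      rw [if_pos hlt]; exact not_lt.mp hg
  · rw [if_neg hlt]
    push_neg at hlt
    have ht0 : 0 ≤ u + c - K := by omega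
    have htK : u + c - K < K := by omega
    by_cases hg : du < pvG dist (u + c - K)
    · rw [if_pos hg]
      have htl : (u + c - K).toNat < dist.size := by rw [hlen]; omega
      have hset : ∀ x, 0 ≤ x → x < K →
          pvG (dist.setIfInBounds (u + c - K).toNat du) x = if x = u + c - K then du else pvG dist x := by
        intro x hx0 hxK
        rw [pvG_set hx0 (by rw [hlen]; omega)]
        by_cases h : x = u + c - K
        · rw [if_pos (by omega), if_pos h]
        · rw [if_neg (by omega), if_neg h]
      refine ⟨⟨by simp [Array.size_setIfInBounds, hlen], ?_, ?_, ?_⟩, ?_, ?_, by simp⟩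
      · intro v hv0 hvK
        rw [hset v hv0 hvK]; split_ifs with hv
        · omega
        · exact hnn v hv0 hvK
      · have hne0 : (0 : Int) ≠ u + c - K := by
          intro h; rw [← h] at hg; omega
        rw [hset 0 (le_refl _) (by omega), if_neg hne0]; exact h0
      · intro v hv0 hvK
        rw [hset v hv0 hvK]
        by_cases hv : v = u + c - K
        · subst hv; rw [if_pos rfl]; exact Or.inr ⟨_, wu.step0 hc hlt⟩
        · rw [if_neg hv]; exact hval v hv0 hvK
      · intro v hv0 hvK
        rw [hset v hv0 hvK]; split_ifs with hv
        · subst hv; omega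
        · exact le_refl _
      · rw [if_neg (by omega), hset (u + c - K) ht0 htK, if_pos rfl]
    · rw [if_neg hg]
      refine ⟨⟨hlen, hnn, h0, hval⟩, fun v _ _ => le_refl _, ?_, fun h => ⟨rfl, h⟩⟩
      rw [if_neg (by omega)]; exact not_lt.mp hg

theorem pvInnerB_fold {K : Int} {C : List Int} {u du : Int} (hOK : pvCoinsOK K C)
    (hu0 : 0 ≤ u) (huK : u < K) (hdu0 : 0 ≤ du) (hwu : ∃ vs, pvW K C u du vs) :
    ∀ (cs : List Int), (∀ x ∈ cs, x ∈ C) → ∀ (s : Array Int × Bool), pvBL K C s.1 →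
      pvBL K C (cs.foldl (pvInnerB K du u) s).1 ∧
      (∀ v, 0 ≤ v → v < K → pvG (cs.foldl (pvInnerB K du u) s).1 v ≤ pvG s.1 v) ∧
      (∀ x ∈ cs, if u + x < K then pvG (cs.foldl (pvInnerB K du u) s).1 (u + x) ≤ du + 1
        else pvG (cs.foldl (pvInnerB K du u) s).1 (u + x - K) ≤ du) ∧
      ((cs.foldl (pvInnerB K du u) s).2 = false →
        (cs.foldl (pvInnerB K du u) s).1 = s.1 ∧ s.2 = false) := by
  intro cs
  induction cs with
  | nil =>
    intro _ s hbl
    exact ⟨hbl, fun v _ _ => le_refl _, by simp, fun h => ⟨rfl, h⟩⟩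
  | cons c cs ih =>
    intro hcs s hbl
    have hc : c ∈ C := hcs c List.mem_cons_self
    have hone := pvInnerB_one hOK hu0 huK hdu0 hwu hc hbl
    have hcs' : ∀ x ∈ cs, x ∈ C := fun x hx => hcs x (List.mem_cons_of_mem _ hx)
    have hrec := ih hcs' (pvInnerB K du u s c) hone.1
    have hc' := hOK.2.2 c hc
    rw [List.foldl_cons]
    refine ⟨hrec.1, ?_, ?_, ?_⟩
    · intro v hv0 hvK
      exact le_trans (hrec.2.1 v hv0 hvK) (hone.2.1 v hv0 hvK)
    · intro x hx
      rcases List.mem_cons.mp hx with rfl | hx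
      · have hb := hone.2.2.1
        split_ifs with hbr
        · rw [if_pos hbr] at hb
          exact le_trans (hrec.2.1 _ (by omega) hbr) hb
        · rw [if_neg hbr] at hb
          exact le_trans (hrec.2.1 _ (by omega) (by omega)) hb
      · exact hrec.2.2.1 x hx
    · intro hfl
      obtain ⟨he1, he2⟩ := hrec.2.2.2 hfl
      obtain ⟨he3, he4⟩ := hone.2.2.2 he2
      exact ⟨by rw [he1, he3], he4⟩

theorem pvRoundB_one {K : Int} {C : List Int} {u : Int} (hOK : pvCoinsOK K C)
    (hu0 : 0 ≤ u) (huK : u < K) {s : Array Int × Bool} (hbl : pvBL K C s.1) :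
    pvBL K C (pvRoundB K C s u).1 ∧
    (∀ v, 0 ≤ v → v < K → pvG (pvRoundB K C s u).1 v ≤ pvG s.1 v) ∧
    (pvG s.1 u < pvINF → ∀ c ∈ C,
      if u + c < K then pvG (pvRoundB K C s u).1 (u + c) ≤ pvG s.1 u + 1
      else pvG (pvRoundB K C s u).1 (u + c - K) ≤ pvG s.1 u) ∧
    ((pvRoundB K C s u).2 = false → (pvRoundB K C s u).1 = s.1 ∧ s.2 = false) := by
  simp only [pvRoundB, pvG_def]
  by_cases hskip : pvG s.1 u = pvINF
  · rw [if_pos hskip]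
    exact ⟨hbl, fun v _ _ => le_refl _, fun h => absurd hskip (by omega), fun h => ⟨rfl, h⟩⟩
  · rw [if_neg hskip]
    have hdu0 : 0 ≤ pvG s.1 u := hbl.2.1 u hu0 huK
    have hwu : ∃ vs, pvW K C u (pvG s.1 u) vs := by
      rcases hbl.2.2.2 u hu0 huK with h | h
      · exact absurd h hskip
      · exact h
    have h := pvInnerB_fold hOK hu0 huK hdu0 hwu C (fun x hx => hx) s hbl
    exact ⟨h.1, h.2.1, fun _ => h.2.2.1, h.2.2.2⟩

theorem pvRoundB_fold {K : Int} {C : List Int} (hOK : pvCoinsOK K C) :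
    ∀ (us : List Int), (∀ x ∈ us, 0 ≤ x ∧ x < K) → ∀ (s : Array Int × Bool), pvBL K C s.1 →
      pvBL K C (us.foldl (pvRoundB K C) s).1 ∧
      (∀ v, 0 ≤ v → v < K → pvG (us.foldl (pvRoundB K C) s).1 v ≤ pvG s.1 v) ∧
      (∀ x ∈ us, pvG s.1 x < pvINF → ∀ c ∈ C,
        if x + c < K then pvG (us.foldl (pvRoundB K C) s).1 (x + c) ≤ pvG s.1 x + 1
        else pvG (us.foldl (pvRoundB K C) s).1 (x + c - K) ≤ pvG s.1 x) ∧
      ((us.foldl (pvRoundB K C) s).2 = false →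
        (us.foldl (pvRoundB K C) s).1 = s.1 ∧ s.2 = false) := by
  intro us
  induction us with
  | nil =>
    intro _ s hbl
    exact ⟨hbl, fun v _ _ => le_refl _, by simp, fun h => ⟨rfl, h⟩⟩
  | cons u us ih =>
    intro hus s hbl
    obtain ⟨hu0, huK⟩ := hus u List.mem_cons_self
    have hone := pvRoundB_one hOK hu0 huK hbl
    have hus' : ∀ x ∈ us, 0 ≤ x ∧ x < K := fun x hx => hus x (List.mem_cons_of_mem _ hx)
    have hrec := ih hus' (pvRoundB K C s u) hone.1
    rw [List.foldl_cons]
    refine ⟨hrec.1, ?_, ?_, ?_⟩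
    · intro v hv0 hvK
      exact le_trans (hrec.2.1 v hv0 hvK) (hone.2.1 v hv0 hvK)
    · intro x hx
      rcases List.mem_cons.mp hx with rfl | hx
      · intro hxI c hc
        have hb := hone.2.2.1 hxI c hc
        have hc' := hOK.2.2 c hc
        split_ifs with hbr
        · rw [if_pos hbr] at hb
          exact le_trans (hrec.2.1 _ (by omega) hbr) hb
        · rw [if_neg hbr] at hb
          exact le_trans (hrec.2.1 _ (by omega) (by omega)) hb
      · intro hxI c hc
        obtain ⟨hx0, hxK⟩ := hus' x hx
        have hxI' : pvG (pvRoundB K C s u).1 x < pvINF :=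
          lt_of_le_of_lt (hone.2.1 x hx0 hxK) hxI
        have hb := hrec.2.2.1 x hx hxI' c hc
        have hle := hone.2.1 x hx0 hxK
        split_ifs with hbr
        · rw [if_pos hbr] at hb; omega
        · rw [if_neg hbr] at hb; omega
    · intro hfl
      obtain ⟨he1, he2⟩ := hrec.2.2.2 hfl
      obtain ⟨he3, he4⟩ := hone.2.2.2 he2
      exact ⟨by rw [he1, he3], he4⟩

theorem pvStableLe {K : Int} {C : List Int} {m : Array Int} (hOK : pvCoinsOK K C)
    (hbl : pvBL K C m)
    (hst : ∀ u, 0 ≤ u → u < K → pvG m u < pvINF → ∀ c ∈ C,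
      if u + c < K then pvG m (u + c) ≤ pvG m u + 1 else pvG m (u + c - K) ≤ pvG m u) :
    ∀ {v d : Int} {n : Nat}, pvWN K C v d n → d ≤ K - 1 → pvG m v ≤ d := by
  have hKI := hOK.2.1
  intro v d n w
  induction w with
  | zero => intro _; rw [hbl.2.2.1]
  | @step1 u d0 n0 c w hc hlt ih =>
    intro hd
    have hu := pvWN_range hOK w
    have hle := ih (by omega)
    have := hst u hu.1.1 hu.1.2 (by omega) c hc
    rw [if_pos hlt] at this
    omega
  | @step0 u d0 n0 c w hc hge ih =>
    intro hd
    have hu := pvWN_range hOK w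
    have hle := ih (by omega)
    have := hst u hu.1.1 hu.1.2 (by omega) c hc
    rw [if_neg (by omega)] at this
    omega

-- after enough rounds every cheap walk bounds the array
theorem pvRoundsB_correct {K : Int} {C : List Int} (hOK : pvCoinsOK K C) :
    ∀ (j k : Nat) (m : Array Int), pvBL K C m →
      (∀ v d (n : Nat), pvWN K C v d n → d ≤ K - 1 → n ≤ k → pvG m v ≤ d) →
      pvBL K C (pvRoundsB K C j m) ∧
      ∀ v d (n : Nat), pvWN K C v d n → d ≤ K - 1 → n ≤ k + j →
        pvG (pvRoundsB K C j m) v ≤ d := by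
  intro j
  induction j with
  | zero =>
    intro k m hbl hup
    exact ⟨hbl, fun v d n w hd hn => hup v d n w hd (by omega)⟩
  | succ j ih =>
    intro k m hbl hup
    have hus : ∀ x ∈ PySem.List.pyRange 0 K 1, 0 ≤ x ∧ x < K := by
      intro x hx
      rw [PySem.List.mem_pyRange_one] at hx
      exact hx
    have hr := pvRoundB_fold hOK (PySem.List.pyRange 0 K 1) hus (m, false) hbl
    dsimp only at hr
    have hKI := hOK.2.1
    have hupd : ∀ v d (n : Nat), pvWN K C v d n → d ≤ K - 1 → n ≤ k + 1 →
        pvG ((PySem.List.pyRange 0 K 1).foldl (pvRoundB K C) (m, false)).1 v ≤ d := by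
      intro v d n w hd hn
      cases w with
      | zero => rw [hr.1.2.2.1]
      | @step1 u d0 n0 c w hc hlt =>
        have hu := pvWN_range hOK w
        have hle := hup u d0 n0 w (by omega) (by omega)
        have := hr.2.2.1 u (by rw [PySem.List.mem_pyRange_one]; exact hu.1) (by omega) c hc
        rw [if_pos hlt] at this
        omega
      | @step0 u d0 n0 c w hc hge =>
        have hu := pvWN_range hOK w
        have hle := hup u d n0 w (by omega) (by omega)
        have := hr.2.2.1 u (by rw [PySem.List.mem_pyRange_one]; exact hu.1) (by omega) c hc
        rw [if_neg (by omega)] at this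
        omega
    have hred : pvRoundsB K C (j + 1) m =
        if ((PySem.List.pyRange 0 K 1).foldl (pvRoundB K C) (m, false)).2 then
          pvRoundsB K C j ((PySem.List.pyRange 0 K 1).foldl (pvRoundB K C) (m, false)).1
        else ((PySem.List.pyRange 0 K 1).foldl (pvRoundB K C) (m, false)).1 := by
      simp [pvRoundsB]
    cases hflag : ((PySem.List.pyRange 0 K 1).foldl (pvRoundB K C) (m, false)).2 with
    | true =>
      rw [hred, hflag, if_pos rfl]
      have := ih (k + 1) _ hr.1 hupd
      exact ⟨this.1, fun v d n w hd hn => this.2 v d n w hd (by omega)⟩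
    | false =>
      rw [hred, hflag, if_neg (by simp)]
      obtain ⟨heq, -⟩ := hr.2.2.2 hflag
      rw [heq]
      refine ⟨hbl, ?_⟩
      intro v d n w hd hn
      refine pvStableLe hOK hbl ?_ w hd
      intro x hx0 hxK hxI c hc
      have := hr.2.2.1 x (by rw [PySem.List.mem_pyRange_one]; exact ⟨hx0, hxK⟩) hxI c hc
      rw [heq] at this
      exact this

-- ===== glue =====

theorem pvBInit {K : Int} {C : List Int} (hK1 : 1 ≤ K) :
    pvBL K C ((Array.replicate K.toNat pvINF).setIfInBounds 0 0) ∧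
    (∀ v d (n : Nat), pvWN K C v d n → d ≤ K - 1 → n ≤ 0 →
      pvG ((Array.replicate K.toNat pvINF).setIfInBounds 0 0) v ≤ d) := by
  have hlenr : (Array.replicate K.toNat pvINF).size = K.toNat := by simp
  have hINFpos : (0 : Int) < pvINF := by unfold pvINF; omega
  have hmg : ∀ x, 0 ≤ x → x < K →
      pvG ((Array.replicate K.toNat pvINF).setIfInBounds 0 0) x =
        if x = 0 then 0 else pvINF := by
    intro x hx0 hxK
    rw [pvG_set hx0 (by rw [hlenr]; omega)]
    by_cases h : x = 0
    · rw [if_pos (by omega), if_pos h]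
    · rw [if_neg (by omega), if_neg h]
      rw [pvG_eq_getElem hx0 (by rw [hlenr]; omega), Array.getElem_replicate]
  constructor
  · refine ⟨by simp [Array.size_setIfInBounds, hlenr], ?_, ?_, ?_⟩
    · intro v hv0 hvK
      rw [hmg v hv0 hvK]
      split_ifs <;> omega
    · rw [hmg 0 (le_refl _) (by omega)]; simp
    · intro v hv0 hvK
      rw [hmg v hv0 hvK]
      by_cases hv : v = 0
      · subst hv; rw [if_pos rfl]; exact Or.inr ⟨[0], pvW.zero⟩
      · rw [if_neg hv]; exact Or.inl rfl
  · intro v d n w hd hn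
    cases w with
    | zero => rw [hmg 0 (le_refl _) (by omega)]; simp
    | @step1 u d0 n0 c w hc hlt => omega
    | @step0 u d0 n0 c w hc hge => omega

theorem pvBfinal {K R : Int} {C : List Int} (hOK : pvCoinsOK K C) (hR0 : 0 ≤ R) (hRK : R < K) :
    (∀ dm, pvIsMin K C R dm →
      pvG (pvRoundsB K C K.toNat ((Array.replicate K.toNat pvINF).setIfInBounds 0 0)) R = dm ∧
      pvG (pvRoundsB K C K.toNat ((Array.replicate K.toNat pvINF).setIfInBounds 0 0)) R < pvINF) ∧
    (¬ pvReach K C R →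
      ¬ pvG (pvRoundsB K C K.toNat ((Array.replicate K.toNat pvINF).setIfInBounds 0 0)) R < pvINF) := by
  have hinit := pvBInit (C := C) hOK.1
  have hcor := pvRoundsB_correct hOK K.toNat 0 _ hinit.1 hinit.2
  have hKI := hOK.2.1
  have hK1 := hOK.1
  constructor
  · intro dm hmin
    obtain ⟨hdmK, n, wn, hnK⟩ := pvMin_le hOK hmin
    have hub : pvG (pvRoundsB K C K.toNat ((Array.replicate K.toNat pvINF).setIfInBounds 0 0)) R ≤ dm :=
      hcor.2 R dm n wn hdmK (by omega)
    have hdm0 : 0 ≤ dm := by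
      obtain ⟨⟨vs, w⟩, -⟩ := hmin
      exact (pvW_basic hOK w).2.1
    have hlb : dm ≤ pvG (pvRoundsB K C K.toNat ((Array.replicate K.toNat pvINF).setIfInBounds 0 0)) R := by
      rcases hcor.1.2.2.2 R hR0 hRK with hI | ⟨vs, w⟩
      · omega
      · exact hmin.2 _ _ w
    exact ⟨by omega, by omega⟩
  · intro hnr hlt
    rcases hcor.1.2.2.2 R hR0 hRK with hI | ⟨vs, w⟩
    · omega
    · exact hnr ⟨_, vs, w⟩

theorem solve_eq_alt (M N : Int) (A : List Int) (hD : Dom_solve M N A)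
    (hP : Pre_solve M N A) : solve M N A = solve_alt M N A := by
  obtain ⟨hne, hnng, hex⟩ := hP
  have hsne : PySem.List.sorted (PySem.Set.ofList A) (fun x => x) false ≠ [] := by
    rw [Ne, PySem.List.sorted_eq_nil_iff]
    intro h
    obtain ⟨a, ha⟩ := List.exists_mem_of_ne_nil A hne
    have hmem := (PySem.Set.mem_ofList A a).mpr ha
    rw [h] at hmem
    simp at hmem
  set s := PySem.List.sorted (PySem.Set.ofList A) (fun x => x) false with hs
  have hget : PySem.List.pyGet? s (-1) = some (s.getLast hsne) := by
    rw [PySem.List.pyGet?_neg_one]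
    exact List.getLast?_eq_getLast hsne
  set K := s.getLast hsne with hK
  have hKs : K ∈ s := List.getLast_mem hsne
  have hKA : K ∈ A := by
    rw [hs, PySem.List.mem_sorted] at hKs
    exact (PySem.Set.mem_ofList A K).mp hKs
  have hDom : ∀ x ∈ A, x ≤ 2147483648 := by
    intro x hx
    unfold Dom_solve at hD
    simp only [Bool.and_eq_true, List.all_eq_true] at hD
    have h2 := hD.2 x hx
    unfold pvDomInt at h2
    have := of_decide_eq_true h2
    omega
  have hKINF : K < pvINF := by
    have := hDom K hKA
    unfold pvINF
    omega
  have hpairs : s.Pairwise (· < ·) := by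
    rw [hs]
    exact PySem.List.sorted_ofList_pairwise_lt A
  have hsplitK : s.dropLast ++ [K] = s := List.dropLast_append_getLast hsne
  have hclt : ∀ c ∈ s.dropLast, c < K := by
    intro c hc
    have hp := hpairs
    rw [← hsplitK, List.pairwise_append] at hp
    exact hp.2.2 c hc K (by simp)
  have hCA : ∀ c ∈ s.dropLast, c ∈ A := by
    intro c hc
    have hcs : c ∈ s := List.mem_of_mem_dropLast hc
    rw [hs, PySem.List.mem_sorted] at hcs
    exact (PySem.Set.mem_ofList A c).mp hcs
  have hK1 : 1 ≤ K := by
    obtain ⟨a, haA, ha1⟩ := hex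
    have has : a ∈ s := by
      rw [hs, PySem.List.mem_sorted]
      exact (PySem.Set.mem_ofList A a).mpr haA
    rw [← hsplitK] at has
    rcases List.mem_append.mp has with h | h
    · have := hclt a h
      omega
    · simp at h
      omega
  have hOK : pvCoinsOK K s.dropLast :=
    ⟨hK1, hKINF, fun c hc => ⟨hnng c (hCA c hc), hclt c hc⟩⟩
  have hRe : PySem.Int.mod M K = M % K := PySem.Int.mod_eq_emod_of_pos (by omega)
  have hR0 : 0 ≤ PySem.Int.mod M K := by rw [hRe]; exact Int.emod_nonneg M (by omega)
  have hRK : PySem.Int.mod M K < K := by rw [hRe]; exact Int.emod_lt_of_pos M (by omega)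
  have hA : solve M N A = pvLoopA M K (PySem.Int.mod M K) s.dropLast
      (2 + K.toNat * 9223372036854775807) [(0, 0)]
      ((Array.replicate K.toNat pvINF).setIfInBounds 0 0) := by
    simp only [solve, ← hs]
    rw [hget]
    dsimp only
    rw [if_neg (by omega : ¬ K ≤ 0)]
  have hB : solve_alt M N A =
      (if pvG (pvRoundsB K s.dropLast K.toNat
            ((Array.replicate K.toNat pvINF).setIfInBounds 0 0)) (PySem.Int.mod M K) < pvINF
        then pvG (pvRoundsB K s.dropLast K.toNat
            ((Array.replicate K.toNat pvINF).setIfInBounds 0 0)) (PySem.Int.mod M K) +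
          PySem.Int.floordiv M K
        else M) := by
    simp only [solve_alt, ← hs]
    rw [hget]
    dsimp only
    rw [if_neg (by omega : ¬ K ≤ 0), PySem.List.slice_to_neg_one]
    simp only [pvG_def]
  have hInit := pvInit (C := s.dropLast) hK1 hR0 hRK
  have hLoop := pvLoopA_correct (M := M) hOK hR0 hRK _ _ _ hInit.1 hInit.2
  have hBf := pvBfinal hOK hR0 hRK
  rw [hA, hB]
  by_cases hreach : pvReach K s.dropLast (PySem.Int.mod M K)
  · obtain ⟨dm, hmin⟩ := pvMin_exists hOK hreach
    obtain ⟨hBeq, hBlt⟩ := hBf.1 dm hmin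
    rw [hLoop.1 dm hmin, if_pos hBlt, hBeq]
  · rw [hLoop.2 hreach, if_neg (hBf.2 hreach)]

-- ===== VERDICT (by name: the statement is the Claim_ definition above) =====
theorem solve_spec : Claim_equal_solve := by
  intro M N A hD hP
  unfold Spec_solve
  exact solve_eq_alt M N A hD hP
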